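-- pv_equiv track=rewrite | github.com/BassFaceIV/Encryption | AES.py | rotWord
-- ===== SOURCE A (Python) =====
-- def rotWord(word, offset = 1):
-- 	for x in range(4 * offset):
-- 		if(x % 4 == 0):
-- 			temp = word[0]
-- 		if(x % 4 == 3):
-- 			word[x % 4] = temp
-- 		else:
-- 			word[x % 4] = word[(x + 1) % 4]
--
-- 	return word
-- ===== SOURCE B (Python) =====
-- def rotWord(word, offset = 1):
-- 	if offset > 0:
-- 		k = offset % 4
-- 		word[:4] = word[k:4] + word[:k]
-- 	return word
-- ===== Notes on version B (the rewrite author's own statement) =====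
-- stated objective: faster
-- what changed: Replaces A's element-by-element in-place loop of 4*offset single rotations by one O(1) slice assignment using the net rotation offset % 4.
-- outside the precondition, e.g. on rotWord([1, 2], 1): A raises IndexError, B returns [2, 1]
import Mathlib
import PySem

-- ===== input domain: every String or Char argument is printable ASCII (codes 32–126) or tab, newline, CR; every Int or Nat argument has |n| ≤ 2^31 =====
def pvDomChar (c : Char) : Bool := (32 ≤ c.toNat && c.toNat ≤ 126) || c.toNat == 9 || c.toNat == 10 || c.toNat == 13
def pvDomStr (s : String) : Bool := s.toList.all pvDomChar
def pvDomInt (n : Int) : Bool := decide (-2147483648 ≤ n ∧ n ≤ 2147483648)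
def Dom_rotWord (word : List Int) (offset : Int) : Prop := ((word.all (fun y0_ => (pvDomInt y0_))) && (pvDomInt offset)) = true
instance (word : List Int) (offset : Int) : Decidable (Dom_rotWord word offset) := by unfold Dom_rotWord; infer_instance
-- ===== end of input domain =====

-- B replaces A's 4*offset single-step in-place loop by one O(1) slice assignment with the net
-- rotation offset % 4 (objective: faster). Both A and B mutate `word` in place identically on
-- the admitted inputs; the theorems below are about the returned value.

-- ===== PORT A =====
-- one iteration of A's for-loop: state is (word, temp)
def rotStep (st : List Int × Int) (x : Int) : List Int × Int :=
  let temp := if PySem.Int.mod x 4 = 0 then PySem.List.pyGetD st.1 0 0 else st.2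
  if PySem.Int.mod x 4 = 3 then
    (PySem.List.pySetD st.1 (PySem.Int.mod x 4) temp, temp)
  else
    (PySem.List.pySetD st.1 (PySem.Int.mod x 4)
       (PySem.List.pyGetD st.1 (PySem.Int.mod (x + 1) 4) 0), temp)

def rotWord (word : List Int) (offset : Int) : List Int :=
  ((PySem.List.pyRange 0 (4 * offset) 1).foldl rotStep (word, 0)).1

-- ===== PORT B =====
def rotWord_alt (word : List Int) (offset : Int) : List Int :=
  if offset > 0 then
    let k := PySem.Int.mod offset 4
    (PySem.List.slice word (some k) (some 4) ++ PySem.List.slice word none (some k))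
      ++ PySem.List.slice word (some 4) none
  else word

-- ===== PRECONDITION & SPEC =====
-- Pre_ excludes exactly the inputs where A raises IndexError: offset ≥ 1 with fewer than 4 elements.
def Pre_rotWord (word : List Int) (offset : Int) : Prop := offset ≤ 0 ∨ 4 ≤ word.length
instance (word : List Int) (offset : Int) : Decidable (Pre_rotWord word offset) := by
  unfold Pre_rotWord; infer_instance

def pvWitness_rotWord : List Int × Int := ([1, 2, 3, 4], 1)

def Spec_rotWord (word : List Int) (offset : Int) (out : List Int) : Prop := out = rotWord_alt word offset
instance (word : List Int) (offset : Int) (out : List Int) : Decidable (Spec_rotWord word offset out) := by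
  unfold Spec_rotWord; infer_instance

-- ===== CLAIM (what is proved, stated in full; the proofs are below) =====
def Claim_equal_rotWord : Prop := ∀ (word : List Int) (offset : Int), Dom_rotWord word offset → Pre_rotWord word offset → Spec_rotWord word offset (rotWord word offset)

-- ===== LEMMAS AND PROOFS =====

-- abstract model of one 4-step block of A's loop: rotate the quadruple left by one
def rotQ : Nat → Int × Int × Int × Int → Int × Int × Int × Int
  | 0, q => q
  | m + 1, (a, b, c, d) => rotQ m (b, c, d, a)

theorem rotQ_succ (n : Nat) (q : Int × Int × Int × Int) :
    rotQ (n + 1) q = rotQ 1 (rotQ n q) := by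
  induction n generalizing q with
  | zero => rfl
  | succ k ihk =>
    obtain ⟨a, b, c, d⟩ := q
    show rotQ (k + 1) (b, c, d, a) = _
    rw [ihk (b, c, d, a)]
    rfl

theorem rotQ_add_four (m : Nat) (q : Int × Int × Int × Int) : rotQ (m + 4) q = rotQ m q := by
  induction m generalizing q with
  | zero => obtain ⟨a, b, c, d⟩ := q; rfl
  | succ n ih =>
    obtain ⟨a, b, c, d⟩ := q
    show rotQ (n + 4) (b, c, d, a) = rotQ n (b, c, d, a)
    exact ih _

theorem rotQ_mod (m : Nat) (q : Int × Int × Int × Int) : rotQ m q = rotQ (m % 4) q := by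
  induction m using Nat.strong_induction_on with
  | _ m ih =>
    by_cases h : m < 4
    · rw [Nat.mod_eq_of_lt h]
    · have h4 : m - 4 + 4 = m := by omega
      have := rotQ_add_four (m - 4) q
      rw [h4] at this
      rw [this, ih (m - 4) (by omega)]
      congr 1
      omega

-- A's loop over one block [4m, 4m+1, 4m+2, 4m+3] rotates the first four elements left by one
theorem rotStep_block (m : Nat) (a b c d temp : Int) (t : List Int) :
    List.foldl rotStep (a :: b :: c :: d :: t, temp)
      (PySem.List.pyRange (4 * (m : Int)) (4 * (m : Int) + 4) 1)
      = (b :: c :: d :: a :: t, a) := by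
  rw [PySem.List.pyRange_one_cons (by omega), PySem.List.pyRange_one_cons (by omega),
      PySem.List.pyRange_one_cons (by omega), PySem.List.pyRange_one_cons (by omega),
      PySem.List.pyRange_one_eq_nil (by omega)]
  have f0 : (4 * (m : Int)) % 4 = 0 := by omega
  have f1 : (4 * (m : Int) + 1) % 4 = 1 := by omega
  have f2 : (4 * (m : Int) + 1 + 1) % 4 = 2 := by omega
  have f3 : (4 * (m : Int) + 1 + 1 + 1) % 4 = 3 := by omega
  simp [rotStep, f0, f1, f2, f3,
        PySem.List.pySetD_of_nonneg, PySem.List.pyGetD_ofNat']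

-- A's whole loop: after m blocks the first four elements are rotQ m of the originals
theorem rotStep_loop (m : Nat) (a b c d : Int) (t : List Int) (temp : Int) :
    ∃ temp', List.foldl rotStep (a :: b :: c :: d :: t, temp)
      (PySem.List.pyRange 0 (4 * (m : Int)) 1)
      = ((rotQ m (a, b, c, d)).1 :: (rotQ m (a, b, c, d)).2.1 ::
         (rotQ m (a, b, c, d)).2.2.1 :: (rotQ m (a, b, c, d)).2.2.2 :: t, temp') := by
  induction m generalizing a b c d temp with
  | zero =>
    refine ⟨temp, ?_⟩
    rw [show ((4 : Int) * ((0 : Nat) : Int)) = 0 by norm_num,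
        PySem.List.pyRange_one_eq_nil (by omega)]
    rfl
  | succ n ih =>
    have hsplit : PySem.List.pyRange 0 (4 * ((n + 1 : Nat) : Int)) 1
        = PySem.List.pyRange 0 (4 * (n : Int)) 1
          ++ PySem.List.pyRange (4 * (n : Int)) (4 * (n : Int) + 4) 1 := by
      rw [show (4 : Int) * ((n + 1 : Nat) : Int) = 4 * (n : Int) + 4 by push_cast; ring]
      exact PySem.List.pyRange_one_append 0 (4 * (n : Int)) (4 * (n : Int) + 4)
        (by positivity) (by omega)
    obtain ⟨temp', hfold⟩ := ih a b c d temp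
    rcases hq : rotQ n (a, b, c, d) with ⟨a', b', c', d'⟩
    refine ⟨a', ?_⟩
    rw [hsplit, List.foldl_append, hfold]
    have hstep : rotQ (n + 1) (a, b, c, d) = (b', c', d', a') := by
      rw [rotQ_succ, hq]
      rfl
    rw [hq] at *
    simp only [hstep]
    exact rotStep_block n a' b' c' d' temp' t

theorem rotWord_spec' (word : List Int) (offset : Int) (h : Pre_rotWord word offset) :
    rotWord word offset = rotWord_alt word offset := by
  rcases le_or_gt offset 0 with hle | hpos
  · unfold rotWord rotWord_alt
    rw [PySem.List.pyRange_one_eq_nil (by omega)]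
    simp [not_lt.mpr hle]
  · have hlen : 4 ≤ word.length := by
      rcases h with h | h
      · omega
      · exact h
    obtain ⟨a, b, c, d, t, rfl⟩ : ∃ a b c d t, word = a :: b :: c :: d :: t := by
      match word, hlen with
      | a :: b :: c :: d :: t, _ => exact ⟨a, b, c, d, t, rfl⟩
    set m : Nat := offset.toNat with hm
    have hoff : offset = (m : Int) := by omega
    unfold rotWord rotWord_alt
    rw [hoff]
    obtain ⟨temp', hfold⟩ := rotStep_loop m a b c d t 0
    rw [hfold]
    have hk : PySem.Int.mod ((m : Int)) 4 = ((m % 4 : Nat) : Int) := by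
      rw [PySem.Int.mod_eq_emod_of_pos (by norm_num)]
      push_cast
      omega
    rw [rotQ_mod]
    have hr : m % 4 < 4 := Nat.mod_lt _ (by norm_num)
    rw [if_pos (by omega)]
    simp only [hk]
    interval_cases h : m % 4 <;>
      simp [rotQ, PySem.List.slice_toNat, PySem.List.slice_to, PySem.List.slice_from,
            List.drop, List.take]

-- ===== VERDICT (by name: the statement is the Claim_ definition above) =====
theorem rotWord_spec : Claim_equal_rotWord := by
  intro word offset _ hpre
  exact rotWord_spec' word offset hpre
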